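-- pv_equiv track=rewrite | github.com/rbf22/betadogma | src/betadogma/data/prepare_gencode.py | make_binned_tracks
-- ===== SOURCE A (Python) =====
-- from typing import Dict, Iterable, List, Optional, Set, Tuple, Union, Any, cast
--
-- def _bin_index(start: int, end: int, bin_size: int, pos: int) -> int:
--     if pos < start or pos >= end:
--         return -1
--     return (pos - start) // bin_size
--
-- def make_binned_tracks(
--     chrom: str,
--     wstart: int,
--     wend: int,
--     bin_size: int,
--     donors: set[int],
--     acceptors: set[int],
--     tss: set[int],
--     polya: set[int],
-- ) -> Dict[str, List[int]]:
--     # Lr must be integral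
--     total = wend - wstart
--     assert total % bin_size == 0, f"Window length {total} not divisible by bin_size {bin_size}"
--     Lr = total // bin_size
--     arrs = {k: [0] * Lr for k in ("donor", "acceptor", "tss", "polya")}
--     for site in donors:
--         b = _bin_index(wstart, wend, bin_size, site)
--         if b >= 0:
--             arrs["donor"][b] = 1
--     for site in acceptors:
--         b = _bin_index(wstart, wend, bin_size, site)
--         if b >= 0:
--             arrs["acceptor"][b] = 1
--     for site in tss:
--         b = _bin_index(wstart, wend, bin_size, site)
--         if b >= 0:
--             arrs["tss"][b] = 1
--     for site in polya:
--         b = _bin_index(wstart, wend, bin_size, site)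
--         if b >= 0:
--             arrs["polya"][b] = 1
--     return arrs
-- ===== SOURCE B (Python) =====
-- def make_binned_tracks(chrom, wstart, wend, bin_size, donors, acceptors, tss, polya):
--     total = wend - wstart
--     assert total % bin_size == 0, f"Window length {total} not divisible by bin_size {bin_size}"
--     Lr = total // bin_size
--     out = {}
--     for name, sites in (("donor", donors), ("acceptor", acceptors), ("tss", tss), ("polya", polya)):
--         occupied = {(s - wstart) // bin_size for s in sites if wstart <= s < wend}
--         out[name] = [1 if b in occupied else 0 for b in range(Lr)]
--     return out
-- ===== Notes on version B (the rewrite author's own statement) =====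
-- stated objective: alternative
-- what changed: Replaces A's scatter of sites into preallocated zero arrays with, per track, building the set of occupied in-window bin indices once and then a gather pass over the bins testing membership.
import Mathlib
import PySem

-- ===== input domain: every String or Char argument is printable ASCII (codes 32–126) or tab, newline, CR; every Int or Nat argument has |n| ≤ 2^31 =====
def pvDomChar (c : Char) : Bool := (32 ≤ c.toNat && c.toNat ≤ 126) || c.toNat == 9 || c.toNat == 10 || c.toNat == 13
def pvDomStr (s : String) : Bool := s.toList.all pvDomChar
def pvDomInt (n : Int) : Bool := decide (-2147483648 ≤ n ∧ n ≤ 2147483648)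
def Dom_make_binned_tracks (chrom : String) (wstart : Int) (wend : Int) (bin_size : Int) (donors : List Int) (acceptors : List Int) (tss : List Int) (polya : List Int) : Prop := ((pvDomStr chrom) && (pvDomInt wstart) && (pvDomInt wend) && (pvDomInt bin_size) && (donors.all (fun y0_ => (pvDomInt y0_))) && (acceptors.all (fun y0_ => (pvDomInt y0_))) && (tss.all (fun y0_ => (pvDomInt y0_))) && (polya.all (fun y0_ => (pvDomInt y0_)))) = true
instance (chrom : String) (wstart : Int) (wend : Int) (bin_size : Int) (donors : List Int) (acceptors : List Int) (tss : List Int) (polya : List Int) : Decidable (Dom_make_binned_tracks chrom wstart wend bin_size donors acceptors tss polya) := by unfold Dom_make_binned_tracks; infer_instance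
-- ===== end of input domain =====

-- B replaces A's scatter of sites into preallocated zero arrays by, per track, a set of
-- occupied bin indices and a membership-gather pass over the bins (alternative decomposition,
-- same cost). Equivalence of the RETURN value is proved on all inputs where Python A returns.

-- ===== PORT A =====
def pvBinIndex (start : Int) (end_ : Int) (bin_size : Int) (pos : Int) : Int :=
  if pos < start ∨ pos ≥ end_ then -1
  else PySem.Int.floordiv (pos - start) bin_size

-- one 'for site in <sites>' scatter loop of A (list assignment arrs[k][b] = 1 via pySetD)
def pvScatter (wstart : Int) (wend : Int) (bin_size : Int) (sites : List Int) (arr : List Int) : List Int :=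
  sites.foldl (fun a site =>
    let b := pvBinIndex wstart wend bin_size site
    if b ≥ 0 then PySem.List.pySetD a b 1 else a) arr

def make_binned_tracks (chrom : String) (wstart : Int) (wend : Int) (bin_size : Int) (donors : List Int) (acceptors : List Int) (tss : List Int) (polya : List Int) : List (String × List Int) :=
  let total := wend - wstart
  -- the assert raises outside Pre_; under Pre_ it passes
  let Lr := PySem.Int.floordiv total bin_size
  let zeros := List.replicate Lr.toNat (0 : Int)   -- [0] * Lr
  [("donor",    pvScatter wstart wend bin_size donors zeros),
   ("acceptor", pvScatter wstart wend bin_size acceptors zeros),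
   ("tss",      pvScatter wstart wend bin_size tss zeros),
   ("polya",    pvScatter wstart wend bin_size polya zeros)]

-- ===== PORT B =====
-- one track of B: build the set of in-window bin indices, then gather over the bins
def pvGather (wstart : Int) (wend : Int) (bin_size : Int) (Lr : Int) (sites : List Int) : List Int :=
  let occupied : PySem.Set Int :=
    PySem.Set.ofList ((sites.filter (fun s => decide (wstart ≤ s ∧ s < wend))).map
      (fun s => PySem.Int.floordiv (s - wstart) bin_size))
  (PySem.List.pyRange 0 Lr 1).map (fun b => if PySem.Set.contains occupied b then 1 else 0)

def make_binned_tracks_alt (chrom : String) (wstart : Int) (wend : Int) (bin_size : Int) (donors : List Int) (acceptors : List Int) (tss : List Int) (polya : List Int) : List (String × List Int) :=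
  let total := wend - wstart
  let Lr := PySem.Int.floordiv total bin_size
  [("donor",    pvGather wstart wend bin_size Lr donors),
   ("acceptor", pvGather wstart wend bin_size Lr acceptors),
   ("tss",      pvGather wstart wend bin_size Lr tss),
   ("polya",    pvGather wstart wend bin_size Lr polya)]

-- ===== PRECONDITION & SPEC =====
-- Pre_ excludes exactly the inputs where Python A raises: bin_size = 0 (ZeroDivisionError),
-- a window length not divisible by bin_size (AssertionError), and the negative-bin_size case
-- where a site equals wstart so A indexes into an empty array (IndexError).
def Pre_make_binned_tracks (chrom : String) (wstart : Int) (wend : Int) (bin_size : Int) (donors : List Int) (acceptors : List Int) (tss : List Int) (polya : List Int) : Prop :=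
  bin_size ≠ 0 ∧ PySem.Int.mod (wend - wstart) bin_size = 0 ∧
    ¬ (bin_size < 0 ∧ wstart < wend ∧
        (wstart ∈ donors ∨ wstart ∈ acceptors ∨ wstart ∈ tss ∨ wstart ∈ polya))
instance (chrom : String) (wstart : Int) (wend : Int) (bin_size : Int) (donors : List Int) (acceptors : List Int) (tss : List Int) (polya : List Int) : Decidable (Pre_make_binned_tracks chrom wstart wend bin_size donors acceptors tss polya) := by unfold Pre_make_binned_tracks; infer_instance

def pvWitness_make_binned_tracks : String × Int × Int × Int × List Int × List Int × List Int × List Int :=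
  ("chr1", 0, 10, 5, [3], [7, 3], [], [12])

def Spec_make_binned_tracks (chrom : String) (wstart : Int) (wend : Int) (bin_size : Int) (donors : List Int) (acceptors : List Int) (tss : List Int) (polya : List Int) (out : List (String × List Int)) : Prop := out = make_binned_tracks_alt chrom wstart wend bin_size donors acceptors tss polya
instance (chrom : String) (wstart : Int) (wend : Int) (bin_size : Int) (donors : List Int) (acceptors : List Int) (tss : List Int) (polya : List Int) (out : List (String × List Int)) : Decidable (Spec_make_binned_tracks chrom wstart wend bin_size donors acceptors tss polya out) := by unfold Spec_make_binned_tracks; infer_instance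

-- ===== CLAIM (what is proved, stated in full; the proofs are below) =====
def Claim_equal_make_binned_tracks : Prop := ∀ (chrom : String) (wstart : Int) (wend : Int) (bin_size : Int) (donors : List Int) (acceptors : List Int) (tss : List Int) (polya : List Int), Dom_make_binned_tracks chrom wstart wend bin_size donors acceptors tss polya → Pre_make_binned_tracks chrom wstart wend bin_size donors acceptors tss polya → Spec_make_binned_tracks chrom wstart wend bin_size donors acceptors tss polya (make_binned_tracks chrom wstart wend bin_size donors acceptors tss polya)

-- ===== LEMMAS AND PROOFS =====

-- the loop body of one scatter iteration of A
def pvStep (ws we bs s : Int) (arr : List Int) : List Int :=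
  if pvBinIndex ws we bs s ≥ 0 then PySem.List.pySetD arr (pvBinIndex ws we bs s) 1 else arr

theorem pvScatter_cons (ws we bs s : Int) (rest : List Int) (arr : List Int) :
    pvScatter ws we bs (s :: rest) arr = pvScatter ws we bs rest (pvStep ws we bs s arr) := rfl

theorem pvStep_length (ws we bs s : Int) (arr : List Int) :
    (pvStep ws we bs s arr).length = arr.length := by
  unfold pvStep; split <;> simp [PySem.List.length_pySetD]

theorem pvScatter_length (ws we bs : Int) (sites : List Int) (arr : List Int) :
    (pvScatter ws we bs sites arr).length = arr.length := by
  induction sites generalizing arr with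
  | nil => rfl
  | cons s rest ih => rw [pvScatter_cons, ih, pvStep_length]

theorem pvStep_getElem (ws we bs s : Int) (arr : List Int) (j : Nat)
    (hj : j < arr.length) (h' : j < (pvStep ws we bs s arr).length) :
    (pvStep ws we bs s arr)[j] =
      if (ws ≤ s ∧ s < we) ∧ PySem.Int.floordiv (s - ws) bs = (j : Int)
      then 1 else arr[j] := by
  by_cases hin : ws ≤ s ∧ s < we
  · have hb : pvBinIndex ws we bs s = PySem.Int.floordiv (s - ws) bs := by
      simp only [pvBinIndex, if_neg (by omega : ¬ (s < ws ∨ s ≥ we))]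
    by_cases hge : (0 : Int) ≤ PySem.Int.floordiv (s - ws) bs
    · have hset : pvStep ws we bs s arr = arr.set (PySem.Int.floordiv (s - ws) bs).toNat 1 := by
        unfold pvStep
        rw [hb, if_pos hge, PySem.List.pySetD_of_nonneg]
        exact hge
      rw [List.getElem_of_eq hset, List.getElem_set]
      have htn : ((PySem.Int.floordiv (s - ws) bs).toNat = j) ↔
          (PySem.Int.floordiv (s - ws) bs = (j : Int)) := by omega
      by_cases hq : PySem.Int.floordiv (s - ws) bs = (j : Int) <;> simp_all
    · have hid : pvStep ws we bs s arr = arr := by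
        unfold pvStep; rw [hb, if_neg (by omega)]
      rw [List.getElem_of_eq hid]
      rw [if_neg (by omega : ¬ ((ws ≤ s ∧ s < we) ∧ PySem.Int.floordiv (s - ws) bs = (j : Int)))]
  · have hid : pvStep ws we bs s arr = arr := by
      unfold pvStep
      rw [show pvBinIndex ws we bs s = -1 from by
            simp only [pvBinIndex, if_pos (by omega : s < ws ∨ s ≥ we)],
          if_neg (by omega)]
    rw [List.getElem_of_eq hid, if_neg (by tauto)]

theorem pvScatter_getElem (ws we bs : Int) (sites : List Int) (arr : List Int) (j : Nat)
    (hj : j < arr.length) (h2 : j < (pvScatter ws we bs sites arr).length) :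
    (pvScatter ws we bs sites arr)[j] =
      if ∃ s ∈ sites, (ws ≤ s ∧ s < we) ∧ PySem.Int.floordiv (s - ws) bs = (j : Int)
      then 1 else arr[j] := by
  induction sites generalizing arr with
  | nil => simp [pvScatter]
  | cons s rest ih =>
    have hlen : j < (pvStep ws we bs s arr).length := by rw [pvStep_length]; exact hj
    have h2' : j < (pvScatter ws we bs rest (pvStep ws we bs s arr)).length := by
      rw [pvScatter_length, pvStep_length]; exact hj
    rw [List.getElem_of_eq (pvScatter_cons ws we bs s rest arr), ih _ hlen h2',
        pvStep_getElem ws we bs s arr j hj hlen]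
    split_ifs <;> simp_all <;> tauto

theorem pvTrack_eq (ws we bs : Int) (sites : List Int) :
    pvScatter ws we bs sites
        (List.replicate (PySem.Int.floordiv (we - ws) bs).toNat (0 : Int)) =
      pvGather ws we bs (PySem.Int.floordiv (we - ws) bs) sites := by
  set Lr := PySem.Int.floordiv (we - ws) bs with hLr
  apply List.ext_getElem
  · simp [pvScatter_length, pvGather, PySem.List.length_pyRange_one]
  · intro j h1 h2
    have hjlen : j < (List.replicate Lr.toNat (0 : Int)).length := by
      simpa [pvScatter_length] using h1
    rw [pvScatter_getElem ws we bs sites _ j hjlen h1]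
    simp only [pvGather, List.getElem_map]
    rw [PySem.List.getElem_pyRange_one]
    have hmem : (PySem.Set.contains
        (PySem.Set.ofList ((sites.filter (fun s => decide (ws ≤ s ∧ s < we))).map
          (fun s => PySem.Int.floordiv (s - ws) bs))) (0 + (j : Int))) = true ↔
        ∃ s ∈ sites, (ws ≤ s ∧ s < we) ∧ PySem.Int.floordiv (s - ws) bs = (j : Int) := by
      rw [PySem.Set.contains_iff, PySem.Set.mem_ofList]
      simp [List.mem_map, List.mem_filter, and_assoc]
    by_cases hx : ∃ s ∈ sites, (ws ≤ s ∧ s < we) ∧ PySem.Int.floordiv (s - ws) bs = (j : Int)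
    · rw [if_pos hx, if_pos (hmem.mpr hx)]
    · rw [if_neg hx, if_neg (fun h => hx (hmem.mp h)), List.getElem_replicate]

-- ===== VERDICT (by name: the statement is the Claim_ definition above) =====
theorem make_binned_tracks_spec : Claim_equal_make_binned_tracks := by
  intro chrom ws we bs donors acceptors tss polya _ _
  show make_binned_tracks chrom ws we bs donors acceptors tss polya =
       make_binned_tracks_alt chrom ws we bs donors acceptors tss polya
  simp only [make_binned_tracks, make_binned_tracks_alt, pvTrack_eq]
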